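-- pv_equiv track=rewrite | github.com/debabrata2025/coding_challenge | recursionChallenge.py | changemixToken
-- ===== SOURCE A (Python) =====
-- def changemixToken(mixstr):
--     newstr = ""
--     i = 0
--     while(i<len(mixstr)):
--         if(i+1)%3 == 0:
--             newstr = newstr + 'X'
--         else:
--             newstr = newstr + mixstr[i]
--         i = i+1
--     return newstr
-- ===== SOURCE B (Python) =====
-- def changemixToken(mixstr):
--     s = list(mixstr)
--     s[2::3] = 'X' * len(s[2::3])
--     return ''.join(s)
-- ===== Notes on version B (the rewrite author's own statement) =====
-- stated objective: faster
-- what changed: Instead of scanning every character and branching on (i+1)%3==0 while growing a string by repeated concatenation, B overwrites exactly the target positions 2,5,8,... in one strided slice assignment on a char list and joins once.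
import Mathlib
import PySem

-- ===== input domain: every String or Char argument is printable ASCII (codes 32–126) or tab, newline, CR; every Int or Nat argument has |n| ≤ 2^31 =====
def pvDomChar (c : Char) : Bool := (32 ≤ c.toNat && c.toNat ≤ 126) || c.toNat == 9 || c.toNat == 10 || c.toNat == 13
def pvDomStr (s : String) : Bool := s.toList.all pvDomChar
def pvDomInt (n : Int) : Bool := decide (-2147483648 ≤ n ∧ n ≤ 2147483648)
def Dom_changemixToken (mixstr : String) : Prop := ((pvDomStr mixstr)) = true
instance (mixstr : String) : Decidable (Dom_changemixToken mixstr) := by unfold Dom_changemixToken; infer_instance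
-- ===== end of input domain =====

-- B replaces A's per-character scan with a branch on (i+1)%3 by one strided slice
-- assignment overwriting exactly positions 2,5,8,... (measurably faster: no quadratic string concatenation).

-- ===== PORT A =====
-- while loop over i = 0..len-1, appending 'X' or mixstr[i] to the accumulator string
def changemixToken (mixstr : String) : String :=
  String.ofList ((PySem.List.pyRange 0 (PySem.Str.len mixstr) 1).foldl
    (fun newstr i =>
      if PySem.Int.mod (i + 1) 3 = 0 then newstr ++ ['X']
      else newstr ++ (PySem.Str.pyGet? mixstr i).toList) [])

-- ===== PORT B =====
-- s = list(mixstr); s[2::3] = 'X' * len(s[2::3]); return ''.join(s)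
-- the slice assignment overwrites each index of range(2, len, 3) with 'X'
def changemixToken_alt (mixstr : String) : String :=
  String.ofList ((PySem.List.pyRange 2 (PySem.Str.len mixstr) 3).foldl
    (fun s i => s.set i.toNat 'X') mixstr.toList)

-- ===== PRECONDITION & SPEC =====
def Spec_changemixToken (mixstr : String) (out : String) : Prop := out = changemixToken_alt mixstr
instance (mixstr : String) (out : String) : Decidable (Spec_changemixToken mixstr out) := by unfold Spec_changemixToken; infer_instance

-- ===== CLAIM (what is proved, stated in full; the proofs are below) =====
def Claim_equal_changemixToken : Prop := ∀ (mixstr : String), Dom_changemixToken mixstr → Spec_changemixToken mixstr (changemixToken mixstr)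

-- ===== LEMMAS AND PROOFS =====

-- A's loop builds the map of j ↦ 'X' or l[j] over range k
lemma A_char (mixstr : String) (k : Nat) (hk : k ≤ mixstr.toList.length) :
    ((PySem.List.pyRange 0 (k : Int) 1).foldl
      (fun newstr i =>
        if PySem.Int.mod (i + 1) 3 = 0 then newstr ++ ['X']
        else newstr ++ (PySem.Str.pyGet? mixstr i).toList) [])
    = (List.range k).map
        (fun j => if (j + 1) % 3 = 0 then 'X' else mixstr.toList.getD j 'X') := by
  induction k with
  | zero => simp [PySem.List.pyRange_one_eq_nil le_rfl]
  | succ k ih =>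
    have hk' : k ≤ mixstr.toList.length := Nat.le_of_succ_le hk
    have hcast : ((k + 1 : Nat) : Int) = (k : Int) + 1 := by push_cast; ring
    rw [hcast, PySem.List.pyRange_one_succ_right (by positivity), List.foldl_append,
        ih hk', List.range_succ, List.map_append]
    simp only [List.foldl_cons, List.foldl_nil, List.map_cons, List.map_nil]
    have hlt : k < mixstr.toList.length := hk
    by_cases h3 : (k + 1) % 3 = 0
    · have hdvd : (3 : Int) ∣ (k : Int) + 1 := by omega
      simp [hdvd, h3]
    · have hdvd : ¬ (3 : Int) ∣ (k : Int) + 1 := by omega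
      simp [hdvd, h3, List.getElem?_eq_getElem hlt]
  
-- the set-fold keeps the length
lemma set_fold_length (R : List Int) (l : List Char) :
    (R.foldl (fun s i => s.set i.toNat 'X') l).length = l.length := by
  induction R generalizing l with
  | nil => rfl
  | cons i R ih => simp [List.foldl_cons, ih]

-- the set-fold overwrites exactly the listed (nonnegative) indices
lemma set_fold_getD (R : List Int) (hR : ∀ i ∈ R, 0 ≤ i) (l : List Char) (j : Nat)
    (hj : j < l.length) :
    (R.foldl (fun s i => s.set i.toNat 'X') l).getD j 'X'
    = if (j : Int) ∈ R then 'X' else l.getD j 'X' := by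
  induction R generalizing l with
  | nil => simp
  | cons i R ih =>
    have hi : 0 ≤ i := hR i (by simp)
    have hR' : ∀ x ∈ R, 0 ≤ x := fun x hx => hR x (by simp [hx])
    rw [List.foldl_cons, ih hR' _ (by simpa using hj)]
    by_cases hmem : (j : Int) ∈ R
    · simp [List.mem_cons, hmem]
    · have hset : (l.set i.toNat 'X').getD j 'X'
          = if (j : Int) = i then 'X' else l.getD j 'X' := by
        rw [List.getD_eq_getElem _ _ (by simpa using hj), List.getElem_set,
            List.getD_eq_getElem _ _ hj]
        have : i.toNat = j ↔ (j : Int) = i := by omega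
        by_cases h : (j : Int) = i <;> simp [this, h]
      rw [hset]
      by_cases hji : (j : Int) = i <;> simp [List.mem_cons, hji, hmem]

theorem changemixToken_spec_aux (mixstr : String) :
    changemixToken mixstr = changemixToken_alt mixstr := by
  unfold changemixToken changemixToken_alt
  rw [PySem.Str.len_eq, A_char mixstr mixstr.toList.length le_rfl]
  congr 1
  set l := mixstr.toList with hl
  apply List.ext_getElem
  · simp [set_fold_length]
  · intro j h1 h2
    have hj : j < l.length := by simpa [set_fold_length] using h2
    have hmemR : ((j : Int) ∈ PySem.List.pyRange 2 (l.length : Int) 3)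
        ↔ ((j + 1) % 3 = 0 ∧ j < l.length) := by
      rw [PySem.List.mem_pyRange_iff_of_pos (by norm_num)]
      omega
    have hR : ∀ i ∈ PySem.List.pyRange 2 (l.length : Int) 3, (0 : Int) ≤ i := by
      intro i hi
      rw [PySem.List.mem_pyRange_iff_of_pos (by norm_num)] at hi
      omega
    have lhs := List.getElem_map
      (f := fun j => if (j + 1) % 3 = 0 then 'X' else l.getD j 'X')
      (l := List.range l.length) (h := h1)
    rw [lhs]
    rw [← List.getD_eq_getElem _ 'X' h2, set_fold_getD _ hR l j hj]
    simp only [hmemR, List.getElem_range]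
    by_cases h3 : (j + 1) % 3 = 0 <;> simp [h3, hj]

-- ===== VERDICT (by name: the statement is the Claim_ definition above) =====
theorem changemixToken_spec : Claim_equal_changemixToken := by
  intro mixstr _
  exact changemixToken_spec_aux mixstr
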